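-- pv_equiv track=rewrite | github.com/BiocPy/DelayedArray | src/delayedarray/Subset.py | _normalize_subset
-- ===== SOURCE A (Python) =====
-- def _normalize_subset(subset, is_sorted, is_unique):
--     if is_unique:
--         if is_sorted:
--             return (subset, range(len(subset)))
--         else:
--             subsorted = list(set(subset))
--             subsorted.sort()
--
--             new_indices = {}
--             for i in range(len(subsorted)):
--                 new_indices[subsorted[i]] = i
--
--             mapping = []
--             for s in subset:
--                 mapping.append(new_indices[s])
--
--             return (subsorted, mapping)
--     else:
--         if is_sorted:
--             subuniq = []
--             mapping = []
--             if len(subset):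
--                 subuniq.append(subset[0])
--                 mapping.append(0)
--
--             for i in range(1, len(subset)):
--                 if subset[i - 1] < subset[i]:
--                     subuniq.append(subset[i])
--                 mapping.append(len(subuniq) - 1)
--
--             return (subuniq, mapping)
--         else:
--             subsorted = list(set(subset))
--             subsorted.sort()
--
--             converter = {}
--             for i in range(len(subsorted)):
--                 converter[subsorted[i]] = i
--
--             mapping = []
--             for s in subset:
--                 mapping.append(converter[s])
--
--             return (subsorted, mapping)
-- ===== SOURCE B (Python) =====
-- def _normalize_subset(subset, is_sorted, is_unique):
--     if is_sorted and is_unique: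
--         return (subset, range(len(subset)))
--
--     pairs = sorted(((subset[i], i) for i in range(len(subset))), key=lambda p: p[0])
--
--     subuniq = []
--     mapping = [0] * len(subset)
--     for v, i in pairs:
--         if not subuniq or subuniq[-1] != v:
--             subuniq.append(v)
--         mapping[i] = len(subuniq) - 1
--     return (subuniq, mapping)
-- ===== Notes on version B (the rewrite author's own statement) =====
-- stated objective: alternative
-- what changed: Replaces A's set()+sort+dict-lookup scheme and its separate linear-dedup branch by a single pass over (value,index) pairs sorted by value, tracking the running rank and writing mapping[i] in place; only the trivial sorted-and-unique identity branch is kept.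
-- outside the precondition, e.g. on _normalize_subset([2, 1], True, False): A returns ([2], [0, 0]), B returns ([1, 2], [1, 0])
import Mathlib
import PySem

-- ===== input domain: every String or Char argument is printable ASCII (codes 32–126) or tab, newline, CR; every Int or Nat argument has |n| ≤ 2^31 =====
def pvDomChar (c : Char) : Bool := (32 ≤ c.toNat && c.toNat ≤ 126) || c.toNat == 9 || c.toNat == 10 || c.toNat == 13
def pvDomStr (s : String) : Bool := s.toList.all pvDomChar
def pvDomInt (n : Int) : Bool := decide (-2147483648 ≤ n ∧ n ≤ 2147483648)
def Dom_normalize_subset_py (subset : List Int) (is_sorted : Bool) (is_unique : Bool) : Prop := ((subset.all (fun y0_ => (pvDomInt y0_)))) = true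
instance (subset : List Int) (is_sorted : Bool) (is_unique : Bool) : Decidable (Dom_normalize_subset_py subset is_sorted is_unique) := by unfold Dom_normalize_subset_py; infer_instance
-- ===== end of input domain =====

-- B replaces A's set()+sort+dict-lookup scheme and A's separate linear dedup branch by one pass
-- over (value, index) pairs sorted by value (objective: alternative decomposition, same asymptotic cost).

-- ===== PORT A =====
def normalize_subset_py (subset : List Int) (is_sorted : Bool) (is_unique : Bool) : List Int × List Int :=
  if is_unique then
    if is_sorted then
      (subset, PySem.List.pyRange 0 subset.length 1)
    else
      -- subsorted = list(set(subset)); subsorted.sort()  (sorting a set: order-independent result)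
      let subsorted := PySem.List.sorted (PySem.Set.ofList subset) (fun x => x) false
      -- for i in range(len(subsorted)): new_indices[subsorted[i]] = i
      let new_indices : PySem.Dict Int Int :=
        (PySem.List.pyRange 0 subsorted.length 1).foldl
          (fun d i => d.insert (PySem.List.pyGetD subsorted i 0) i) PySem.Dict.empty
      -- mapping.append(new_indices[s]): the key s is always present (s ∈ set(subset)), so getD is exact
      let mapping := subset.foldl (fun m s => m ++ [new_indices.getD s 0]) []
      (subsorted, mapping)
  else
    if is_sorted then
      -- if len(subset): subuniq.append(subset[0]); mapping.append(0)
      let st0 : List Int × List Int :=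
        if subset.length ≠ 0 then ([PySem.List.pyGetD subset 0 0], [0]) else ([], [])
      -- for i in range(1, len(subset)): …
      (PySem.List.pyRange 1 subset.length 1).foldl
        (fun (st : List Int × List Int) i =>
          let subuniq :=
            if PySem.List.pyGetD subset (i - 1) 0 < PySem.List.pyGetD subset i 0
            then st.1 ++ [PySem.List.pyGetD subset i 0] else st.1
          (subuniq, st.2 ++ [(subuniq.length : Int) - 1])) st0
    else
      let subsorted := PySem.List.sorted (PySem.Set.ofList subset) (fun x => x) false
      let converter : PySem.Dict Int Int :=
        (PySem.List.pyRange 0 subsorted.length 1).foldl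
          (fun d i => d.insert (PySem.List.pyGetD subsorted i 0) i) PySem.Dict.empty
      -- mapping.append(converter[s]): the key s is always present, so getD is exact
      let mapping := subset.foldl (fun m s => m ++ [converter.getD s 0]) []
      (subsorted, mapping)

-- ===== PORT B =====
def normalize_subset_py_alt (subset : List Int) (is_sorted : Bool) (is_unique : Bool) : List Int × List Int :=
  if is_sorted && is_unique then
    (subset, PySem.List.pyRange 0 subset.length 1)
  else
    -- pairs = sorted(((subset[i], i) for i in range(len(subset))), key=lambda p: p[0])
    let pairs := PySem.List.sorted
      ((PySem.List.pyRange 0 subset.length 1).map (fun i => (PySem.List.pyGetD subset i 0, i)))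
      (fun p => p.1) false
    -- for v, i in pairs: …; mapping[i] = len(subuniq) - 1  (i is a valid index, so pySetD is exact)
    pairs.foldl
      (fun (st : List Int × List Int) p =>
        let subuniq := if st.1.getLast? ≠ some p.1 then st.1 ++ [p.1] else st.1
        (subuniq, PySem.List.pySetD st.2 p.2 ((subuniq.length : Int) - 1)))
      ([], List.replicate subset.length 0)

-- ===== PRECONDITION & SPEC =====
-- Pre_ excludes only inputs whose is_sorted flag falsely promises a sorted list while is_unique is
-- false: there A's consecutive-comparison dedup trusts the lying flag and returns an accidental,
-- flag-dependent value, while B returns the honest normalization — both are defensible on a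
-- violated caller contract, so that corner is excluded.
def Pre_normalize_subset_py (subset : List Int) (is_sorted : Bool) (is_unique : Bool) : Prop :=
  (is_sorted = true ∧ is_unique = false) → subset.Pairwise (· ≤ ·)
instance (subset : List Int) (is_sorted : Bool) (is_unique : Bool) : Decidable (Pre_normalize_subset_py subset is_sorted is_unique) := by unfold Pre_normalize_subset_py; infer_instance
def pvWitness_normalize_subset_py : List Int × Bool × Bool := ([1, 1, 2], true, false)
def Spec_normalize_subset_py (subset : List Int) (is_sorted : Bool) (is_unique : Bool) (out : List Int × List Int) : Prop := out = normalize_subset_py_alt subset is_sorted is_unique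
instance (subset : List Int) (is_sorted : Bool) (is_unique : Bool) (out : List Int × List Int) : Decidable (Spec_normalize_subset_py subset is_sorted is_unique out) := by unfold Spec_normalize_subset_py; infer_instance

-- ===== CLAIM (what is proved, stated in full; the proofs are below) =====
def Claim_equal_normalize_subset_py : Prop := ∀ (subset : List Int) (is_sorted : Bool) (is_unique : Bool), Dom_normalize_subset_py subset is_sorted is_unique → Pre_normalize_subset_py subset is_sorted is_unique → Spec_normalize_subset_py subset is_sorted is_unique (normalize_subset_py subset is_sorted is_unique)

-- ===== LEMMAS AND PROOFS =====

-- The common value both programs compute outside the identity branch: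
-- sorted distinct values, and each element's rank therein.
def pvU (subset : List Int) : List Int := PySem.List.sorted (PySem.Set.ofList subset) (fun x => x) false
def pvOut (subset : List Int) : List Int × List Int :=
  (pvU subset, subset.map (fun s => ((pvU subset).idxOf s : Int)))

-- chain dedup: append v unless it equals the current last element
def pvCd1 (su : List Int) (v : Int) : List Int := if su.getLast? ≠ some v then su ++ [v] else su
def pvCd (su : List Int) (vs : List Int) : List Int := vs.foldl pvCd1 su
-- the fold B runs
def pvStep (st : List Int × List Int) (p : Int × Int) : List Int × List Int :=
  let subuniq := if st.1.getLast? ≠ some p.1 then st.1 ++ [p.1] else st.1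
  (subuniq, PySem.List.pySetD st.2 p.2 ((subuniq.length : Int) - 1))

theorem pvCd1_getLast? (su : List Int) (v : Int) : (pvCd1 su v).getLast? = some v := by
  unfold pvCd1; split_ifs with h
  · simp
  · simpa using h

theorem pvCd_append (su : List Int) (xs ys : List Int) : pvCd su (xs ++ ys) = pvCd (pvCd su xs) ys := by
  simp [pvCd, List.foldl_append]

theorem pvCd_prefix (su : List Int) (vs : List Int) : su <+: pvCd su vs := by
  induction vs generalizing su with
  | nil => simp [pvCd]
  | cons v r ih =>
    refine List.IsPrefix.trans ?_ (ih (pvCd1 su v))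
    unfold pvCd1; split_ifs <;> simp

theorem pvCd_mem (vs : List Int) (su : List Int) (x : Int) : x ∈ pvCd su vs ↔ x ∈ su ∨ x ∈ vs := by
  induction vs generalizing su with
  | nil => simp [pvCd]
  | cons v r ih =>
    show x ∈ pvCd (pvCd1 su v) r ↔ _
    rw [ih]
    unfold pvCd1; split_ifs with h
    · simp; tauto
    · rw [not_not] at h
      have hv : v ∈ su := List.mem_of_getLast? h
      simp
      constructor
      · tauto
      · rintro (hx | hx | hx) <;> [tauto; (subst hx; tauto); tauto]

theorem pv_last_max (su : List Int) (v : Int) (h : su.Pairwise (· < ·)) (hv : v ∈ su)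
    (hmax : ∀ x ∈ su, x ≤ v) : su.getLast? = some v := by
  induction su with
  | nil => simp at hv
  | cons a t ih =>
    rcases List.pairwise_cons.mp h with ⟨ha, ht⟩
    cases t with
    | nil =>
        have : v = a := by simpa using hv
        simp [this]
    | cons b t' =>
      have hvt : v ∈ b :: t' := by
        rcases List.mem_cons.mp hv with rfl | hvt
        · exfalso; have := ha b (by simp); have := hmax b (by simp); omega
        · exact hvt
      rw [List.getLast?_cons_cons]
      exact ih ht hvt (fun x hx => hmax x (List.mem_cons_of_mem a hx))

theorem pvCd_pairwise (vs : List Int) (su : List Int) (h : su.Pairwise (· < ·))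
    (hle : ∀ x ∈ su, ∀ v ∈ vs, x ≤ v) (hvs : vs.Pairwise (· ≤ ·)) :
    (pvCd su vs).Pairwise (· < ·) := by
  induction vs generalizing su with
  | nil => exact h
  | cons y r ih =>
    rcases List.pairwise_cons.mp hvs with ⟨hyr, hr⟩
    show ((pvCd (pvCd1 su y) r)).Pairwise (· < ·)
    have hsu' : (pvCd1 su y).Pairwise (· < ·) := by
      unfold pvCd1; split_ifs with hne
      · rw [List.pairwise_append]
        refine ⟨h, by simp, ?_⟩
        intro a ha b hb
        have hb' : b = y := by simpa using hb
        rw [hb']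
        have hale : a ≤ y := hle a ha y (by simp)
        rcases lt_or_eq_of_le hale with hlt | heq
        · exact hlt
        · exact absurd (heq ▸ pv_last_max su a h ha (fun z hz => hle z hz a (by simp [heq]))) hne
      · exact h
    refine ih (pvCd1 su y) hsu' ?_ hr
    intro a ha w hw
    unfold pvCd1 at ha; split_ifs at ha with hne
    · rcases List.mem_append.mp ha with ha | ha
      · exact hle a ha w (List.mem_cons_of_mem y hw)
      · have : a = y := by simpa using ha
        subst this; exact hyr w hw
    · exact hle a ha w (List.mem_cons_of_mem y hw)

theorem pvCd_eq_pvU (subset vs : List Int) (hperm : vs.Perm subset) (hvs : vs.Pairwise (· ≤ ·)) :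
    pvCd [] vs = pvU subset := by
  have hpw : (pvCd [] vs).Pairwise (· < ·) :=
    pvCd_pairwise vs [] (by simp) (by simp) hvs
  have hnd : (pvCd [] vs).Nodup := hpw.imp (fun hlt => ne_of_lt hlt)
  symm
  refine PySem.List.sorted_eq_of_perm_of_pairwise_lt _ _ _ ?_ hpw
  refine (List.perm_ext_iff_of_nodup hnd (PySem.Set.nodup_ofList subset)).mpr ?_
  intro a
  rw [pvCd_mem, PySem.Set.mem_ofList]
  simp [hperm.mem_iff]

theorem pv_idx_last (F su : List Int) (v : Int) (hF : F.Pairwise (· < ·)) (hpre : su <+: F)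
    (hlast : su.getLast? = some v) : (su.length : Int) - 1 = ((F.idxOf v : Nat) : Int) := by
  rcases hpre with ⟨t, rfl⟩
  rcases List.eq_nil_or_concat su with rfl | ⟨l, a, rfl⟩
  · simp at hlast
  · rw [List.concat_eq_append] at hlast hF ⊢
    have hva : a = v := by simpa using hlast
    rw [← hva]
    have hnotmem : a ∉ l := by
      rcases List.pairwise_append.mp ((List.pairwise_append.mp hF).1) with ⟨_, _, hcross⟩
      intro hmem
      have := hcross a hmem a (by simp)
      omega
    have hmem : a ∈ l ++ [a] := by simp
    rw [List.idxOf_append_of_mem hmem, List.idxOf_append_of_notMem hnotmem]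
    simp

theorem pvScan_fst (q : List (Int × Int)) (su m : List Int) :
    (q.foldl pvStep (su, m)).1 = pvCd su (q.map Prod.fst) := by
  induction q generalizing su m with
  | nil => rfl
  | cons p r ih => exact ih _ _

theorem pvScan_snd (q : List (Int × Int)) (su m : List Int)
    (h : (pvCd su (q.map Prod.fst)).Pairwise (· < ·)) :
    (q.foldl pvStep (su, m)).2 =
      q.foldl (fun m' p => PySem.List.pySetD m' p.2 (((pvCd su (q.map Prod.fst)).idxOf p.1 : Nat) : Int)) m := by
  induction q generalizing su m with
  | nil => rfl
  | cons p r ih =>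
    have hF : pvCd su ((p :: r).map Prod.fst) = pvCd (pvCd1 su p.1) (r.map Prod.fst) := rfl
    have hsu' : pvCd1 su p.1 <+: pvCd su ((p :: r).map Prod.fst) := by
      rw [hF]; exact pvCd_prefix _ _
    have hval : ((pvCd1 su p.1).length : Int) - 1
        = (((pvCd su ((p :: r).map Prod.fst)).idxOf p.1 : Nat) : Int) :=
      pv_idx_last _ _ _ h hsu' (pvCd1_getLast? su p.1)
    show (r.foldl pvStep (pvStep (su, m) p)).2 = _
    rw [show pvStep (su, m) p = (pvCd1 su p.1, PySem.List.pySetD m p.2 (((pvCd1 su p.1).length : Int) - 1)) from rfl]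
    rw [ih (pvCd1 su p.1) _ (by rw [← hF]; exact h)]
    simp only [List.foldl_cons, hval, hF]

theorem pv_writes_len (q : List (Int × Int)) (g : Int → Int) (m : List Int) :
    (q.foldl (fun m' p => PySem.List.pySetD m' p.2 (g p.2)) m).length = m.length := by
  induction q generalizing m with
  | nil => rfl
  | cons p r ih => rw [List.foldl_cons, ih, PySem.List.length_pySetD]

theorem pv_writes (q : List (Int × Int)) (g : Int → Int) :
    ∀ (m : List Int), (∀ p ∈ q, 0 ≤ p.2 ∧ p.2 < (m.length : Int)) → ∀ (j : Nat), j < m.length →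
    (q.foldl (fun m' p => PySem.List.pySetD m' p.2 (g p.2)) m)[j]? =
      if (j : Int) ∈ q.map Prod.snd then some (g j) else m[j]? := by
  induction q with
  | nil => intro m _ j _; simp
  | cons p r ih =>
    intro m hrange j hj
    obtain ⟨hp0, hpl⟩ := hrange p (by simp)
    obtain ⟨k, hk⟩ : ∃ k : Nat, p.2 = (k : Int) := ⟨p.2.toNat, by omega⟩
    have hklen : k < m.length := by omega
    rw [List.foldl_cons]
    have hm' : PySem.List.pySetD m p.2 (g p.2) = m.set k (g p.2) := by
      rw [hk, PySem.List.pySetD_natCast]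
    rw [hm', ih (m.set k (g p.2))
      (fun p' hp' => by simpa using hrange p' (List.mem_cons_of_mem p hp'))
      j (by simpa using hj)]
    rw [List.getElem?_set]
    by_cases hmem : (j : Int) ∈ r.map Prod.snd
    · simp [hmem]
    · by_cases hkj : k = j
      · subst hkj
        simp [hmem, hk, hklen]
      · have : (j:Int) ∉ (p :: r).map Prod.snd := by
          simp [hmem, hk]
          omega
        simp [hmem, hkj, hk]
        intro heq; omega

theorem pv_dict_aux (u : List Int) (hu : u.Nodup) :
    ∀ (n : Nat), n ≤ u.length → ∀ (s : Int),
    (((List.range n).foldl (fun d (k : Nat) => d.insert (PySem.List.pyGetD u (k : Int) 0) (k : Int)) (PySem.Dict.empty : PySem.Dict Int Int)).getD s 0)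
      = if s ∈ u.take n then ((u.idxOf s : Nat) : Int) else 0 := by
  intro n
  induction n with
  | zero => intro _ s; simp [PySem.Dict.getD_empty]
  | succ n ih =>
    intro hn s
    have hnlen : n < u.length := by omega
    rw [List.range_succ, List.foldl_append, List.foldl_cons, List.foldl_nil]
    rw [PySem.Dict.getD_insert]
    have hget : PySem.List.pyGetD u (n : Int) 0 = u[n] := by
      rw [PySem.List.pyGetD_natCast, List.getD_eq_getElem?_getD]
      simp [hnlen]
    rw [hget]
    have htake : u.take (n+1) = u.take n ++ [u[n]] := by
      rw [List.take_add_one]; simp [hnlen]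
    by_cases hs : s = u[n]
    · subst hs
      rw [if_pos rfl, if_pos (htake ▸ List.mem_append_right _ (by simp))]
      rw [List.Nodup.idxOf_getElem hu n hnlen]
    · rw [if_neg hs, ih (by omega) s]
      have : s ∈ u.take (n+1) ↔ s ∈ u.take n := by
        rw [htake, List.mem_append]; simp [hs]
      rw [if_congr this rfl rfl]

theorem pv_dict (u : List Int) (hu : u.Nodup) (s : Int) (hs : s ∈ u) :
    ((PySem.List.pyRange 0 u.length 1).foldl
      (fun d i => d.insert (PySem.List.pyGetD u i 0) i) PySem.Dict.empty).getD s 0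
      = ((u.idxOf s : Nat) : Int) := by
  rw [PySem.List.pyRange_one, List.foldl_map]
  have : ((u.length : Int) - 0).toNat = u.length := by omega
  rw [this]
  simpa [hs] using pv_dict_aux u hu u.length le_rfl s

theorem pvA_unsorted (subset : List Int) :
    (let subsorted := PySem.List.sorted (PySem.Set.ofList subset) (fun x => x) false
     let d : PySem.Dict Int Int :=
       (PySem.List.pyRange 0 subsorted.length 1).foldl
         (fun d i => d.insert (PySem.List.pyGetD subsorted i 0) i) PySem.Dict.empty
     (subsorted, subset.foldl (fun m s => m ++ [d.getD s 0]) [])) = pvOut subset := by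
  have hnodup : (pvU subset).Nodup :=
    (PySem.List.sorted_ofList_pairwise_lt subset).imp (fun hlt => ne_of_lt hlt)
  show (pvU subset, _) = pvOut subset
  unfold pvOut
  refine Prod.ext rfl ?_
  show subset.foldl (fun m s => m ++ [_]) [] = _
  rw [PySem.List.foldl_append_singleton_eq_map (fun s => _) subset []]
  rw [List.nil_append]
  refine List.map_congr_left ?_
  intro s hs
  have hsu : s ∈ pvU subset := by
    rw [pvU, PySem.List.mem_sorted, PySem.Set.mem_ofList]; exact hs
  exact pv_dict (pvU subset) hnodup s hsu

theorem pvB_pass (subset : List Int) (is_sorted is_unique : Bool)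
    (h : (is_sorted && is_unique) = false) :
    normalize_subset_py_alt subset is_sorted is_unique = pvOut subset := by
  rw [normalize_subset_py_alt, if_neg (by simp [h])]
  set base := (PySem.List.pyRange 0 subset.length 1).map (fun i => (PySem.List.pyGetD subset i 0, i)) with hbase
  set pairs := PySem.List.sorted base (fun p => p.1) false with hpairs
  have hbf : base.map Prod.fst = subset := by
    rw [hbase, List.map_map]
    exact PySem.List.map_pyGetD_pyRange_zero' subset 0
  have hbs : base.map Prod.snd = PySem.List.pyRange 0 subset.length 1 := by
    rw [hbase, List.map_map]
    have hcomp : Prod.snd ∘ (fun i : Int => (PySem.List.pyGetD subset i 0, i)) = id := rfl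
    rw [hcomp, List.map_id]
  have hmem_base : ∀ p ∈ pairs, p.1 = PySem.List.pyGetD subset p.2 0 ∧ 0 ≤ p.2 ∧ p.2 < (subset.length : Int) := by
    intro p hp
    rw [hpairs, PySem.List.mem_sorted, hbase, List.mem_map] at hp
    obtain ⟨i, hi, rfl⟩ := hp
    have := PySem.List.mem_pyRange_one.mp hi
    exact ⟨rfl, this.1, this.2⟩
  have hperm : (pairs.map Prod.fst).Perm subset := by
    rw [← hbf]; exact (PySem.List.sorted_perm base (fun p => p.1) false).map Prod.fst
  have hpw : (pairs.map Prod.fst).Pairwise (· ≤ ·) :=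
    List.pairwise_map.mpr (PySem.List.sorted_pairwise base (fun p => p.1))
  have hcd : pvCd [] (pairs.map Prod.fst) = pvU subset := pvCd_eq_pvU subset _ hperm hpw
  have hpwlt : (pvCd [] (pairs.map Prod.fst)).Pairwise (· < ·) := by
    rw [hcd]; exact PySem.List.sorted_ofList_pairwise_lt subset
  have hfold : (pairs.foldl
      (fun (st : List Int × List Int) p =>
        let subuniq := if st.1.getLast? ≠ some p.1 then st.1 ++ [p.1] else st.1
        (subuniq, PySem.List.pySetD st.2 p.2 ((subuniq.length : Int) - 1)))
      ([], List.replicate subset.length 0))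
      = pairs.foldl pvStep ([], List.replicate subset.length 0) := rfl
  rw [hfold]
  unfold pvOut
  refine Prod.ext ?_ ?_
  · rw [pvScan_fst, hcd]
  · show (pairs.foldl pvStep ([], List.replicate subset.length 0)).2 = _
    rw [pvScan_snd pairs [] _ hpwlt]
    rw [PySem.List.foldl_congr_mem pairs _
      (fun m' p => PySem.List.pySetD m' p.2
        ((fun i => (((pvU subset).idxOf (PySem.List.pyGetD subset i 0) : Nat) : Int)) p.2)) _
      (fun acc p hp => by simp only; rw [hcd, (hmem_base p hp).1])]
    refine List.ext_getElem? ?_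
    intro j
    have hlen : (pairs.foldl (fun m' p => PySem.List.pySetD m' p.2
        ((fun i => (((pvU subset).idxOf (PySem.List.pyGetD subset i 0) : Nat) : Int)) p.2))
        (List.replicate subset.length 0)).length = subset.length := by
      rw [pv_writes_len pairs (fun i => (((pvU subset).idxOf (PySem.List.pyGetD subset i 0) : Nat) : Int)) (List.replicate subset.length 0)]; simp
    by_cases hj : j < subset.length
    · rw [pv_writes pairs (fun i => (((pvU subset).idxOf (PySem.List.pyGetD subset i 0) : Nat) : Int)) (List.replicate subset.length 0)
        (fun p hp => (hmem_base p hp).2.imp id (by simp))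
        j (by simpa using hj)]
      have hjmem : (j : Int) ∈ pairs.map Prod.snd := by
        have : (pairs.map Prod.snd).Perm (PySem.List.pyRange 0 subset.length 1) := by
          rw [← hbs]; exact (PySem.List.sorted_perm base (fun p => p.1) false).map Prod.snd
        rw [this.mem_iff, PySem.List.mem_pyRange_one]
        constructor <;> [positivity; exact_mod_cast hj]
      rw [if_pos hjmem]
      rw [List.getElem?_map, List.getElem?_eq_getElem hj]
      simp only [Option.map_some]
      rw [PySem.List.pyGetD_natCast, List.getD_eq_getElem?_getD, List.getElem?_eq_getElem hj]
      rfl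
    · rw [List.getElem?_eq_none (by omega : (pairs.foldl (fun m' p => PySem.List.pySetD m' p.2
        ((fun i => (((pvU subset).idxOf (PySem.List.pyGetD subset i 0) : Nat) : Int)) p.2))
        (List.replicate subset.length 0)).length ≤ j)]
      rw [List.getElem?_eq_none (by simpa using le_of_not_gt hj)]

def pvT (subset : List Int) (m : Nat) : List Int := pvCd [] (subset.take m)

theorem pvT_succ (subset : List Int) (m : Nat) (hm : m < subset.length) :
    pvT subset (m + 1) = pvCd1 (pvT subset m) subset[m] := by
  unfold pvT
  rw [List.take_add_one, List.getElem?_eq_getElem hm]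
  show pvCd [] (subset.take m ++ [subset[m]]) = _
  rw [pvCd_append]; rfl

theorem pvT_last (subset : List Int) (m : Nat) (hm1 : 1 ≤ m) (hm : m ≤ subset.length) :
    (pvT subset m).getLast? = some subset[m - 1] := by
  obtain ⟨k, rfl⟩ : ∃ k, m = k + 1 := ⟨m - 1, by omega⟩
  have h : (pvT subset (k + 1)).getLast? = some (subset[k]'(by omega)) := by
    rw [pvT_succ subset k (by omega), pvCd1_getLast?]
  simpa using h

theorem pvA_sorted (subset : List Int) (hs : subset.Pairwise (· ≤ ·)) :
    normalize_subset_py subset true false = pvOut subset := by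
  have hcons : ∀ (k : Nat) (hk : k + 1 < subset.length), subset[k]'(by omega) ≤ subset[k+1]'hk := by
    intro k hk
    exact List.pairwise_iff_getElem.mp hs k (k+1) (by omega) hk (by omega)
  rw [normalize_subset_py]
  simp only [Bool.false_eq_true, if_false, if_true]
  rcases Nat.eq_zero_or_pos subset.length with hlen | hlen
  · have : subset = [] := List.eq_nil_of_length_eq_zero hlen
    subst this
    rfl
  · have hst0 : (if subset.length ≠ 0 then ([PySem.List.pyGetD subset 0 0], [(0:Int)]) else ([], []))
        = ([subset[0]], [(0:Int)]) := by
      rw [if_pos (by omega)]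
      congr 1
      have : (0 : Int) = ((0 : Nat) : Int) := rfl
      rw [this, PySem.List.pyGetD_natCast, List.getD_eq_getElem?_getD, List.getElem?_eq_getElem hlen]
      rfl
    rw [hst0]
    have key : ∀ (m : Nat), 1 ≤ m → m ≤ subset.length →
        (PySem.List.pyRange 1 m 1).foldl
          (fun (st : List Int × List Int) i =>
            let subuniq :=
              if PySem.List.pyGetD subset (i - 1) 0 < PySem.List.pyGetD subset i 0
              then st.1 ++ [PySem.List.pyGetD subset i 0] else st.1
            (subuniq, st.2 ++ [(subuniq.length : Int) - 1])) ([subset[0]], [(0:Int)])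
        = (pvT subset m, (List.range m).map (fun j => ((pvT subset (j+1)).length : Int) - 1)) := by
      intro m
      induction m with
      | zero => omega
      | succ m ih =>
        intro _ hm
        rcases Nat.eq_zero_or_pos m with rfl | hm1
        · -- m + 1 = 1
          rw [PySem.List.pyRange_one_eq_nil (by simp), List.foldl_nil]
          have h1 : pvT subset 1 = [subset[0]] := by
            unfold pvT
            rw [List.take_add_one, List.take_zero, List.getElem?_eq_getElem hlen]
            rfl
          refine Prod.ext h1.symm ?_
          simp [h1]
        · have hmlt : m < subset.length := by omega
          have hrange : PySem.List.pyRange 1 ((m : Nat) + 1 : Nat) 1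
              = PySem.List.pyRange 1 m 1 ++ [(m : Int)] := by
            have hc : ((m + 1 : Nat) : Int) = (m : Int) + 1 := by omega
            rw [hc]
            exact PySem.List.pyRange_one_succ_right (by exact_mod_cast hm1)
          rw [hrange, List.foldl_append, ih hm1 (by omega), List.foldl_cons, List.foldl_nil]
          simp only
          have hg1 : PySem.List.pyGetD subset ((m : Int) - 1) 0 = subset[m - 1] := by
            have : (m : Int) - 1 = ((m - 1 : Nat) : Int) := by omega
            rw [this, PySem.List.pyGetD_natCast, List.getD_eq_getElem?_getD,
              List.getElem?_eq_getElem (by omega : m - 1 < subset.length)]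
            rfl
          have hg2 : PySem.List.pyGetD subset (m : Int) 0 = subset[m] := by
            rw [PySem.List.pyGetD_natCast, List.getD_eq_getElem?_getD,
              List.getElem?_eq_getElem hmlt]
            rfl
          have hlast : (pvT subset m).getLast? = some subset[m - 1] := pvT_last subset m hm1 (by omega)
          rw [hg1, hg2]
          have hcond : (subset[m - 1] < subset[m])
              ↔ ((pvT subset m).getLast? ≠ some subset[m]) := by
            rw [hlast]
            have hle : subset[m-1] ≤ subset[m] := by
              have := hcons (m-1) (by omega)
              simpa [Nat.sub_add_cancel hm1] using this
            constructor
            · intro hlt hne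
              rw [Option.some_inj] at hne
              omega
            · intro hne
              rcases lt_or_eq_of_le hle with h | h
              · exact h
              · exact absurd (by rw [h]) hne
          have hfst : (if subset[m - 1] < subset[m]
              then (pvT subset m) ++ [subset[m]] else (pvT subset m))
              = pvT subset (m + 1) := by
            rw [pvT_succ subset m hmlt, pvCd1]
            split_ifs with h1 h2 h2
            · rfl
            · exact absurd (hcond.mp h1) h2
            · exact absurd (hcond.mpr h2) h1
            · rfl
          rw [hfst]
          refine Prod.ext rfl ?_
          show _ ++ _ = _
          rw [List.range_succ, List.map_append]
          rfl
    rw [key subset.length hlen le_rfl]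
    unfold pvOut
    have hu : pvCd [] subset = pvU subset := pvCd_eq_pvU subset subset (List.Perm.refl _) hs
    refine Prod.ext ?_ ?_
    · show pvT subset subset.length = pvU subset
      unfold pvT
      rw [List.take_length]
      exact hu
    · show (List.range subset.length).map _ = _
      refine List.ext_getElem (by simp) ?_
      intro j h1 h2
      simp only [List.getElem_map, List.getElem_range]
      have hjlen : j < subset.length := by simpa using h1
      have hpre : pvT subset (j+1) <+: pvU subset := by
        have hsplit : pvU subset = pvCd (pvT subset (j+1)) (subset.drop (j+1)) := by
          rw [← hu]
          conv_lhs => rw [← List.take_append_drop (j+1) subset]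
          rw [pvCd_append]
          rfl
        rw [hsplit]
        exact pvCd_prefix _ _
      have hlast : (pvT subset (j+1)).getLast? = some subset[j] := by
        have := pvT_last subset (j+1) (by omega) (by omega)
        simpa using this
      exact pv_idx_last (pvU subset) (pvT subset (j+1)) subset[j]
        (PySem.List.sorted_ofList_pairwise_lt subset) hpre hlast


-- ===== VERDICT (by name: the statement is the Claim_ definition above) =====
theorem normalize_subset_py_spec : Claim_equal_normalize_subset_py := by
  intro subset is_sorted is_unique _hdom hpre
  unfold Spec_normalize_subset_py
  cases is_sorted <;> cases is_unique
  · rw [pvB_pass subset false false rfl, ← pvA_unsorted subset]; rfl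
  · rw [pvB_pass subset false true rfl, ← pvA_unsorted subset]; rfl
  · rw [pvB_pass subset true false rfl, pvA_sorted subset (hpre ⟨rfl, rfl⟩)]
  · rfl
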